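-- pv_equiv track=rewrite | github.com/jie-jw-wu/code-hidden-assumption | assumption_miner/dependency.py | _narrow_to_keyword_lines
-- ===== SOURCE A (Python) =====
-- from typing import Optional
--
-- def _narrow_to_keyword_lines(
--     lines: list[str],
--     start: int,
--     end: int,
--     keywords: list[str],
-- ) -> tuple[Optional[int], Optional[int]]:
--     """
--     Within the line range [start, end] (1-indexed, inclusive), find the
--     contiguous block spanning all lines that contain at least one keyword.
--
--     Returns (first_match_line, last_match_line) or (None, None) if no line
--     matches any keyword.
--     """
--     matching: list[int] = []
--     for lineno in range(start, end + 1):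
--         line_text = lines[lineno - 1].lower() if lineno <= len(lines) else ""
--         if any(kw in line_text for kw in keywords):
--             matching.append(lineno)
--
--     if not matching:
--         return None, None
--     return matching[0], matching[-1]
-- ===== SOURCE B (Python) =====
-- def _narrow_to_keyword_lines(lines, start, end, keywords):
--     def hit(lineno):
--         text = lines[lineno - 1].lower() if lineno <= len(lines) else ""
--         return any(kw in text for kw in keywords)
--
--     first = None
--     for lineno in range(start, end + 1):
--         if hit(lineno):
--             first = lineno
--             break
--     if first is None:
--         return None, None
--     for lineno in range(end, start - 1, -1):
--         if hit(lineno):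
--             return first, lineno
-- ===== Notes on version B (the rewrite author's own statement) =====
-- stated objective: alternative
-- what changed: Instead of materialising the full list of matching line numbers and indexing its ends, B runs two early-exit scans: a forward scan that stops at the first matching line and a backward scan that stops at the last, so no list is built and each scan breaks as soon as it finds a match.
import Mathlib
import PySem

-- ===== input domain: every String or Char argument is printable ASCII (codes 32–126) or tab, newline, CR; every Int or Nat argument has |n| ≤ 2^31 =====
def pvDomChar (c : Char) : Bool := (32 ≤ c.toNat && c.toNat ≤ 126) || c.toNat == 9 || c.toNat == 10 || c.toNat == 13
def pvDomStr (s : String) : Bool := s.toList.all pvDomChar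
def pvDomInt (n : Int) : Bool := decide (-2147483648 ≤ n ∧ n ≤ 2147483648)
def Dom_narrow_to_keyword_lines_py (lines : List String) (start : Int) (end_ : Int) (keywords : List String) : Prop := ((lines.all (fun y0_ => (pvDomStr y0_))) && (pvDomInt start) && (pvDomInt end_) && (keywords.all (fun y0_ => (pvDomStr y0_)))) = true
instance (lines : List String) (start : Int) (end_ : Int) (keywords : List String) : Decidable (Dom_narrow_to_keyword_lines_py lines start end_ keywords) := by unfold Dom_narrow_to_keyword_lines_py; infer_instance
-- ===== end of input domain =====

-- B replaces A's collect-all-matches list with two early-exit scans (forward for the first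
-- match, backward for the last); same results, no list built — objective: alternative.


-- ===== PORT A =====
-- per-line test, the identical expression in both Pythons:
-- line_text = lines[lineno-1].lower() if lineno <= len(lines) else ""; any(kw in line_text …)
-- (.getD "" is only reached where lines[lineno-1] raises IndexError; Pre_ excludes those inputs)
def pvLineHit (lines : List String) (keywords : List String) (lineno : Int) : Bool :=
  let line_text : String :=
    if lineno ≤ (lines.length : Int)
    then PySem.Str.lower ((PySem.List.pyGet? lines (lineno - 1)).getD "")
    else ""
  keywords.any (fun kw => PySem.Str.isIn kw line_text)

def narrow_to_keyword_lines_py (lines : List String) (start : Int) (end_ : Int) (keywords : List String) : Option Int × Option Int :=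
  let matching : List Int :=
    (PySem.List.pyRange start (end_ + 1) 1).foldl
      (fun acc lineno => if pvLineHit lines keywords lineno then acc ++ [lineno] else acc) []
  if matching.isEmpty then (none, none)
  else (PySem.List.pyGet? matching 0, PySem.List.pyGet? matching (-1))

-- ===== PORT B =====
-- a loop that breaks at the first lineno in l with a keyword hit (Source B's for/break)
def pvFirstHit (lines : List String) (keywords : List String) : List Int → Option Int
  | [] => none
  | x :: xs => if pvLineHit lines keywords x then some x else pvFirstHit lines keywords xs

def narrow_to_keyword_lines_py_alt (lines : List String) (start : Int) (end_ : Int) (keywords : List String) : Option Int × Option Int :=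
  match pvFirstHit lines keywords (PySem.List.pyRange start (end_ + 1) 1) with
  | none => (none, none)
  | some first => (some first, pvFirstHit lines keywords (PySem.List.pyRange end_ (start - 1) (-1)))

-- ===== PRECONDITION & SPEC =====
-- Pre_ excludes exactly the inputs where the Python A raises IndexError: the very first
-- iteration lineno = start accesses lines[start-1] with start-1 < -len(lines), which
-- happens iff start ≤ end and start + len(lines) ≤ 0 (B raises there too).
def Pre_narrow_to_keyword_lines_py (lines : List String) (start : Int) (end_ : Int) (keywords : List String) : Prop :=
  ¬ (start ≤ end_ ∧ start + (lines.length : Int) ≤ 0)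
instance (lines : List String) (start : Int) (end_ : Int) (keywords : List String) : Decidable (Pre_narrow_to_keyword_lines_py lines start end_ keywords) := by unfold Pre_narrow_to_keyword_lines_py; infer_instance

def pvWitness_narrow_to_keyword_lines_py : List String × Int × Int × List String :=
  (["abc", "Key b", "x", "kEy"], 1, 4, ["key"])

def Spec_narrow_to_keyword_lines_py (lines : List String) (start : Int) (end_ : Int) (keywords : List String) (out : Option Int × Option Int) : Prop := out = narrow_to_keyword_lines_py_alt lines start end_ keywords
instance (lines : List String) (start : Int) (end_ : Int) (keywords : List String) (out : Option Int × Option Int) : Decidable (Spec_narrow_to_keyword_lines_py lines start end_ keywords out) := by unfold Spec_narrow_to_keyword_lines_py; infer_instance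

-- ===== CLAIM (what is proved, stated in full; the proofs are below) =====
def Claim_equal_narrow_to_keyword_lines_py : Prop := ∀ (lines : List String) (start : Int) (end_ : Int) (keywords : List String), Dom_narrow_to_keyword_lines_py lines start end_ keywords → Pre_narrow_to_keyword_lines_py lines start end_ keywords → Spec_narrow_to_keyword_lines_py lines start end_ keywords (narrow_to_keyword_lines_py lines start end_ keywords)

-- ===== LEMMAS AND PROOFS =====

-- A's collecting foldl is a filter
theorem pvFoldl_collect_eq_filter (p : Int → Bool) (l : List Int) (acc : List Int) :
    l.foldl (fun acc x => if p x then acc ++ [x] else acc) acc = acc ++ l.filter p := by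
  induction l generalizing acc with
  | nil => simp
  | cons x xs ih =>
    simp only [List.foldl_cons, List.filter_cons]
    by_cases h : p x <;> simp [h, ih]

-- B's break-loop is find?
theorem pvFirstHit_eq_find? (lines keywords : List String) (l : List Int) :
    pvFirstHit lines keywords l = l.find? (pvLineHit lines keywords) := by
  induction l with
  | nil => rfl
  | cons x xs ih =>
    simp only [pvFirstHit, List.find?_cons]
    by_cases h : pvLineHit lines keywords x <;> simp [h, ih]

theorem pvFilter_head? (p : Int → Bool) (l : List Int) :
    (l.filter p).head? = l.find? p := by
  induction l with
  | nil => rfl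
  | cons x xs ih =>
    by_cases h : p x <;> simp [h, ih]

theorem pvFilter_getLast? (p : Int → Bool) (l : List Int) :
    (l.filter p).getLast? = l.reverse.find? p := by
  rw [List.getLast?_eq_head?_reverse, ← List.filter_reverse, pvFilter_head?]

theorem pvPyGet?_zero (l : List Int) (h : l ≠ []) :
    PySem.List.pyGet? l 0 = l.head? := by
  cases l with
  | nil => simp at h
  | cons x xs => simp [PySem.List.pyGet?, PySem.List.pyIdx?]

theorem pvPyGet?_neg_one (l : List Int) (h : l ≠ []) :
    PySem.List.pyGet? l (-1) = l.getLast? := by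
  have h1 : 0 < l.length := List.length_pos_iff.mpr h
  have := PySem.List.pyGetD_neg_ofNat l 1 0 (by omega) (by exact_mod_cast h1)
  have hg : PySem.List.pyGet? l (-1) = some (l[l.length - 1]) := by
    simp only [PySem.List.pyGetD] at this
    cases hc : PySem.List.pyGet? l (-1) with
    | none =>
      exfalso
      have hr := (PySem.List.pyGet?_eq_none_iff (xs := l) (i := -1)).mp hc
      simp [PySem.Raise.InRange] at hr
      omega
    | some v =>
      rw [hc] at this; simp at this
      simp [this]
  rw [hg, List.getLast?_eq_getElem?]
  simp

-- ===== VERDICT (by name: the statement is the Claim_ definition above) =====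
theorem narrow_to_keyword_lines_py_spec : Claim_equal_narrow_to_keyword_lines_py := by
  intro lines start end_ keywords _ _
  unfold Spec_narrow_to_keyword_lines_py narrow_to_keyword_lines_py narrow_to_keyword_lines_py_alt
  simp only [pvFoldl_collect_eq_filter, List.nil_append, pvFirstHit_eq_find?,
    PySem.List.pyRange_neg_one_eq_reverse]
  have hsub : start - 1 + 1 = start := by ring
  rw [hsub]
  set p := pvLineHit lines keywords
  set R := PySem.List.pyRange start (end_ + 1) 1 with hR
  cases hf : R.find? p with
  | none =>
    have : R.filter p = [] := List.filter_eq_nil_iff.mpr (fun x hx =>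
      by simpa using List.find?_eq_none.mp hf x hx)
    simp [this]
  | some v =>
    have hne : R.filter p ≠ [] := by
      intro hnil
      have := pvFilter_head? p R
      rw [hnil, hf] at this; simp at this
    rw [if_neg (by simpa [List.isEmpty_iff] using hne)]
    rw [pvPyGet?_zero _ hne, pvPyGet?_neg_one _ hne, pvFilter_head?, pvFilter_getLast?, hf]

theorem pvWitness_ok :
    Dom_narrow_to_keyword_lines_py (pvWitness_narrow_to_keyword_lines_py.1) (pvWitness_narrow_to_keyword_lines_py.2.1) (pvWitness_narrow_to_keyword_lines_py.2.2.1) (pvWitness_narrow_to_keyword_lines_py.2.2.2) ∧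
    Pre_narrow_to_keyword_lines_py (pvWitness_narrow_to_keyword_lines_py.1) (pvWitness_narrow_to_keyword_lines_py.2.1) (pvWitness_narrow_to_keyword_lines_py.2.2.1) (pvWitness_narrow_to_keyword_lines_py.2.2.2) := by
  decide
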